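-- pv_equiv track=rewrite | github.com/PPZeen/Comprog_graders | 09_MoreDC_34.py | pattern6
-- ===== SOURCE A (Python) =====
-- def pattern6( N ):
--     tab = []
--     if N==0 : return tab
--     for i in range(N):
--         tab.append([])
--         for j in range(N):
--             tab[i].append(0)
--     i = 0
--     j = 0
--     x = 1
--     while(not(i==0 and j==N-1)):
--         while (j<N):
--             tab[i][j] = x
--             x += 1
--             i+=1
--             j+=1
--         i-=2
--         j-=1
--         if(i==0 and j==N-1): break
--         while (i>-1):
--             tab[i][j] = x
--             x += 1
--             i-=1
--             j-=1
--         i+=1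
--         j+=2
--     tab[i][j] = x
--     return tab
-- ===== SOURCE B (Python) =====
-- def pattern6(N):
--     if N == 0:
--         return []
--     tab = [[0] * N for _ in range(N)]
--     x = 1
--     for d in range(N):
--         rng = range(N - d)
--         if d % 2 == 1:
--             rng = reversed(rng)
--         for i in rng:
--             tab[i][i + d] = x
--             x += 1
--     return tab
-- ===== Notes on version B (the rewrite author's own statement) =====
-- stated objective: simpler
-- what changed: Replaces A's stateful zigzag walk (nested while loops shuttling two cursors up and down with cursor-adjustment arithmetic and a break) by a plain for-loop over the upper diagonals d, filling each diagonal's N-d cells ascending for even d and descending for odd d.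
import Mathlib
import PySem

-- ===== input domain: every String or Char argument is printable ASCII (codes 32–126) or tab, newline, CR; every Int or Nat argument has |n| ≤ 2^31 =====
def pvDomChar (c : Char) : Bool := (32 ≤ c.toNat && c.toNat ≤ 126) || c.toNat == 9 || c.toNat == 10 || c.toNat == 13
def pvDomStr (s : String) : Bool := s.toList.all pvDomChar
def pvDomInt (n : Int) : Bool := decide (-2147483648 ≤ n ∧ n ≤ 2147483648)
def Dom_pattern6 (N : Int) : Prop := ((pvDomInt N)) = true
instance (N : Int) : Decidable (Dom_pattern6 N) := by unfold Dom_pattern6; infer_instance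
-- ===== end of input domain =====

-- B replaces A's stateful zigzag cursor walk by a simple loop over the upper diagonals (objective: simpler).


-- ===== PORT A =====
-- tab[i][j] = v (indices are always in range on the admitted inputs)
def setCell (tab : List (List Int)) (i j : Int) (v : Int) : List (List Int) :=
  match tab[i.toNat]? with
  | some row => tab.set i.toNat (row.set j.toNat v)
  | none => tab

-- inner `while (j < N): tab[i][j] = x; x += 1; i += 1; j += 1`
def loop1 (N : Int) (tab : List (List Int)) (i j x : Int) :
    List (List Int) × Int × Int × Int :=
  if h : j < N then loop1 N (setCell tab i j x) (i + 1) (j + 1) (x + 1)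
  else (tab, i, j, x)
termination_by (N - j).toNat
decreasing_by omega

-- inner `while (i > -1): tab[i][j] = x; x += 1; i -= 1; j -= 1`
def loop2 (tab : List (List Int)) (i j x : Int) :
    List (List Int) × Int × Int × Int :=
  if h : i > -1 then loop2 (setCell tab i j x) (i - 1) (j - 1) (x + 1)
  else (tab, i, j, x)
termination_by (i + 1).toNat
decreasing_by omega

-- outer `while (not (i == 0 and j == N-1)): …` — fuel only makes the loop total
-- (on every admitted input the fuel is never exhausted; on negative N Python A loops forever)
def outerLoop (fuel : Nat) (N : Int) (tab : List (List Int)) (i j x : Int) :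
    List (List Int) × Int × Int × Int :=
  match fuel with
  | 0 => (tab, i, j, x)
  | fuel + 1 =>
    if i = 0 ∧ j = N - 1 then (tab, i, j, x)
    else
      let (tab, i, j, x) := loop1 N tab i j x
      let i := i - 2
      let j := j - 1
      if i = 0 ∧ j = N - 1 then (tab, i, j, x)
      else
        let (tab, i, j, x) := loop2 tab i j x
        outerLoop fuel N tab (i + 1) (j + 2) x

def pattern6 (N : Int) : List (List Int) :=
  if N = 0 then []
  else
    let tab := (PySem.List.pyRange 0 N 1).foldl
      (fun tab _ => tab ++ [(PySem.List.pyRange 0 N 1).foldl (fun row _ => row ++ [(0 : Int)]) []]) []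
    let (tab, i, j, x) := outerLoop (N + 1).toNat N tab 0 0 1
    setCell tab i j x

-- ===== PORT B =====
def diagWrite (d : Int) (acc : List (List Int) × Int) (i : Int) : List (List Int) × Int :=
  (setCell acc.1 i (i + d) acc.2, acc.2 + 1)

-- one diagonal: for i in rng: tab[i][i+d] = x; x += 1  (rng reversed for odd d)
def fillDiag (N : Int) (acc : List (List Int) × Int) (d : Int) : List (List Int) × Int :=
  let rng := PySem.List.pyRange 0 (N - d) 1
  let rng := if d % 2 = 1 then rng.reverse else rng
  rng.foldl (diagWrite d) acc

def pattern6_alt (N : Int) : List (List Int) :=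
  if N = 0 then []
  else
    let tab := (PySem.List.pyRange 0 N 1).map (fun _ => List.replicate N.toNat (0 : Int))
    ((PySem.List.pyRange 0 N 1).foldl (fillDiag N) (tab, 1)).1

-- ===== PRECONDITION & SPEC =====
-- A loops forever on negative N (it never returns there), so Pre_ admits exactly N ≥ 0.
def Pre_pattern6 (N : Int) : Prop := 0 ≤ N
instance (N : Int) : Decidable (Pre_pattern6 N) := by unfold Pre_pattern6; infer_instance
def pvWitness_pattern6 : Int := (4)

def Spec_pattern6 (N : Int) (out : List (List Int)) : Prop := out = pattern6_alt N
instance (N : Int) (out : List (List Int)) : Decidable (Spec_pattern6 N out) := by unfold Spec_pattern6; infer_instance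

-- ===== CLAIM (what is proved, stated in full; the proofs are below) =====
def Claim_equal_pattern6 : Prop := ∀ (N : Int), Dom_pattern6 N → Pre_pattern6 N → Spec_pattern6 N (pattern6 N)

-- ===== LEMMAS AND PROOFS =====

theorem loop1_eq (N : Int) : ∀ (n : Nat) (tab : List (List Int)) (x i d : Int),
    0 ≤ d → i + d + n = N →
    loop1 N tab i (i + d) x =
      (((PySem.List.pyRange i (N - d) 1).foldl (diagWrite d) (tab, x)).1, N - d, N,
        ((PySem.List.pyRange i (N - d) 1).foldl (diagWrite d) (tab, x)).2) := by
  intro n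
  induction n with
  | zero =>
    intro tab x i d hd hn
    rw [loop1]
    have h1 : ¬ (i + d < N) := by omega
    have h2 : (N : Int) - d ≤ i := by omega
    rw [PySem.List.pyRange_one_eq_nil h2]
    simp [h1]
    omega
  | succ n ih =>
    intro tab x i d hd hn
    rw [loop1]
    have h1 : i + d < N := by omega
    have h2 : i < N - d := by omega
    rw [PySem.List.pyRange_one_cons h2]
    simp only [h1, dite_true, List.foldl_cons]
    have := ih (setCell tab i (i + d) x) (x + 1) (i + 1) d hd (by omega)
    have harg : (i + 1) + d = (i + d) + 1 := by ring
    rw [harg] at this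
    rw [this]
    rfl

theorem loop2_eq : ∀ (n : Nat) (tab : List (List Int)) (x i d : Int),
    i + 1 = n →
    loop2 tab i (i + d) x =
      ((((PySem.List.pyRange 0 (i + 1) 1).reverse).foldl (diagWrite d) (tab, x)).1, -1, d - 1,
        (((PySem.List.pyRange 0 (i + 1) 1).reverse).foldl (diagWrite d) (tab, x)).2) := by
  intro n
  induction n with
  | zero =>
    intro tab x i d hn
    rw [loop2]
    have h1 : ¬ (i > -1) := by omega
    have h2 : i + 1 ≤ (0 : Int) := by omega
    rw [PySem.List.pyRange_one_eq_nil h2]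
    simp [h1]
    omega
  | succ n ih =>
    intro tab x i d hn
    rw [loop2]
    have h1 : i > -1 := by omega
    have h2 : (0 : Int) ≤ i := by omega
    rw [PySem.List.pyRange_one_succ_right h2]
    simp only [h1, dite_true, List.reverse_append, List.reverse_cons, List.reverse_nil,
      List.nil_append, List.cons_append, List.foldl_cons]
    have := ih (setCell tab i (i + d) x) (x + 1) (i - 1) d (by omega)
    have harg : (i - 1) + d = (i + d) - 1 := by ring
    rw [harg] at this
    have harg2 : (i - 1) + 1 = i := by ring
    rw [harg2] at this
    rw [this]
    rfl

-- finalize = the trailing `tab[i][j] = x; return tab`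
def finalize (s : List (List Int) × Int × Int × Int) : List (List Int) :=
  setCell s.1 s.2.1 s.2.2.1 s.2.2.2

theorem outer_eq (N : Int) : ∀ (fuel : Nat) (d x : Int) (tab : List (List Int)),
    0 ≤ d → d < N → d % 2 = 0 → N - d ≤ 2 * fuel →
    finalize (outerLoop fuel N tab 0 d x) =
      ((PySem.List.pyRange d N 1).foldl (fillDiag N) (tab, x)).1 := by
  intro fuel
  induction fuel with
  | zero => intro d x tab h0 h1 h2 h3; omega
  | succ fuel ih =>
    intro d x tab h0 h1 h2 h3
    rw [outerLoop]
    by_cases hend : d = N - 1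
    · -- top-of-loop exit: last diagonal, single cell (0, N-1)
      subst hend
      rw [if_pos ⟨rfl, rfl⟩]
      rw [PySem.List.pyRange_one_cons h1, PySem.List.pyRange_one_eq_nil (by omega : N ≤ (N - 1) + 1)]
      have hlen : N - (N - 1) = 1 := by omega
      simp only [List.foldl_cons, List.foldl_nil, fillDiag, hlen, h2]
      rw [PySem.List.pyRange_one_cons (by omega : (0:Int) < 1),
        PySem.List.pyRange_one_eq_nil (by omega : (1:Int) ≤ 0 + 1)]
      simp [finalize, diagWrite]
    · rw [if_neg (by intro h; exact hend h.2)]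
      have hzd : (0 : Int) + d = d := by ring
      have hl1 := loop1_eq N (N - d).toNat tab x 0 d h0 (by omega)
      rw [hzd] at hl1
      rw [hl1]
      dsimp only
      -- even diagonal d, filled ascending = fillDiag N (tab, x) d
      have hfd : (PySem.List.pyRange 0 (N - d) 1).foldl (diagWrite d) (tab, x) =
          fillDiag N (tab, x) d := by
        simp [fillDiag, h2]
      by_cases hbrk : d = N - 2
      · -- break: diagonal d+1 is the single cell (0, N-1), written by the final assignment
        rw [if_pos ⟨by omega, rfl⟩]
        rw [PySem.List.pyRange_one_cons h1, PySem.List.pyRange_one_cons (by omega : d + 1 < N),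
          PySem.List.pyRange_one_eq_nil (by omega : N ≤ d + 1 + 1)]
        simp only [List.foldl_cons, List.foldl_nil]
        have hodd : (d + 1) % 2 = 1 := by omega
        have hlen : N - (d + 1) = 1 := by omega
        have hstep : ∀ acc : List (List Int) × Int,
            fillDiag N acc (d + 1) = (setCell acc.1 0 (N - 1) acc.2, acc.2 + 1) := by
          intro acc
          simp only [fillDiag, hlen, hodd, if_pos]
          rw [PySem.List.pyRange_one_cons (by omega : (0:Int) < 1),
            PySem.List.pyRange_one_eq_nil (by omega : (1:Int) ≤ 0 + 1)]
          simp [diagWrite, show (0:Int) + (d + 1) = N - 1 from by omega]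
        simp only [finalize]
        rw [hfd, hstep]
        rw [show N - d - 2 = (0 : Int) from by omega]
      · rw [if_neg (by intro h; omega)]
        -- loop2 runs down diagonal d+1 from its bottom cell (N-d-2, N-1)
        have harg : (N - d - 2) + (d + 1) = N - 1 := by ring
        have hl2 := loop2_eq (N - d - 1).toNat ((PySem.List.pyRange 0 (N - d) 1).foldl (diagWrite d) (tab, x)).1 ((PySem.List.pyRange 0 (N - d) 1).foldl (diagWrite d) (tab, x)).2 (N - d - 2) (d + 1) (by omega)
        rw [harg] at hl2
        have hi2 : (N - d - 2) + 1 = N - (d + 1) := by ring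
        rw [hi2] at hl2
        rw [hl2]
        have hodd : (d + 1) % 2 = 1 := by omega
        have hfd2 : ((PySem.List.pyRange 0 (N - (d + 1)) 1).reverse).foldl (diagWrite (d + 1))
              ((PySem.List.pyRange 0 (N - d) 1).foldl (diagWrite d) (tab, x)) =
            fillDiag N (fillDiag N (tab, x) d) (d + 1) := by
          rw [hfd]
          simp [fillDiag, hodd]
        have hxeq : (-1 : Int) + 1 = 0 := by ring
        have hjeq : (d + 1 - 1) + 2 = d + 2 := by ring
        rw [hxeq, hjeq]
        have hrec := ih (d + 2) (((PySem.List.pyRange 0 (N - (d+1)) 1).reverse).foldl (diagWrite (d + 1)) ((PySem.List.pyRange 0 (N - d) 1).foldl (diagWrite d) (tab, x))).2 (((PySem.List.pyRange 0 (N - (d+1)) 1).reverse).foldl (diagWrite (d + 1)) ((PySem.List.pyRange 0 (N - d) 1).foldl (diagWrite d) (tab, x))).1 (by omega) (by omega) (by omega) (by omega)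
        rw [hrec]
        rw [PySem.List.pyRange_one_cons h1, PySem.List.pyRange_one_cons (by omega : d + 1 < N)]
        simp only [List.foldl_cons]
        rw [hfd2, show d + 1 + 1 = d + 2 from by ring]

-- A's row-by-row appended grid = B's comprehension grid
theorem foldl_append_const {α : Type} (c : α) :
    ∀ (l : List Int) (acc : List α),
      l.foldl (fun t _ => t ++ [c]) acc = acc ++ List.replicate l.length c := by
  intro l
  induction l with
  | nil => intro acc; simp
  | cons a l ih =>
    intro acc
    simp only [List.foldl_cons, List.length_cons, ih]
    simp [List.replicate_succ, List.append_assoc]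
    
theorem init_eq (N : Int) :
    (PySem.List.pyRange 0 N 1).foldl
        (fun tab _ => tab ++ [(PySem.List.pyRange 0 N 1).foldl (fun row _ => row ++ [(0 : Int)]) []]) [] =
      (PySem.List.pyRange 0 N 1).map (fun _ => List.replicate N.toNat (0 : Int)) := by
  rw [foldl_append_const, foldl_append_const]
  simp [PySem.List.length_pyRange_one, List.map_const']

-- ===== VERDICT (by name: the statement is the Claim_ definition above) =====
theorem pattern6_spec : Claim_equal_pattern6 := by
  intro N _hdom hpre
  unfold Spec_pattern6 pattern6 pattern6_alt
  by_cases h0 : N = 0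
  · simp [h0]
  · have hN : 1 ≤ N := by
      unfold Pre_pattern6 at hpre; omega
    simp only [h0, if_false]
    rw [init_eq]
    have := outer_eq N (N + 1).toNat 0 1
      ((PySem.List.pyRange 0 N 1).map (fun _ => List.replicate N.toNat (0 : Int)))
      (by omega) (by omega) (by omega) (by omega)
    simpa [finalize] using this
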